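-- pv_equiv track=rewrite | github.com/achan33/Rosalind | RosalindBioinformaticsStronghold/RecurringRabbits.py | recurr
-- ===== SOURCE A (Python) =====
-- def recurr(months, offspring ):
--     #starting pair
--     if(months == 1):
--         return 1
--     #if offspring of 1 pair is 3 return as n =2 , 3
--     elif(months == 2):
--         return offspring
--     pgen1 =recurr(months -1 , offspring)
--     pgen2 =recurr(months-2 , offspring)
--     if(months <=4):
--         return pgen1 +pgen2
--     return(pgen1 +(pgen2 * offspring))
-- ===== SOURCE B (Python) =====
-- def recurr(months, offspring):
--     # Bottom-up: keep only the last two generation counts.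
--     if months == 1:
--         return 1
--     prev, cur = 1, offspring
--     for m in range(3, months + 1):
--         prev, cur = cur, cur + prev * (1 if m <= 4 else offspring)
--     return cur
-- ===== Notes on version B (the rewrite author's own statement) =====
-- stated objective: faster
-- what changed: Replaces A's naive double recursion with a bottom-up loop keeping only the last two terms (the months<=4 branch becomes a per-step multiplier).
import Mathlib
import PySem

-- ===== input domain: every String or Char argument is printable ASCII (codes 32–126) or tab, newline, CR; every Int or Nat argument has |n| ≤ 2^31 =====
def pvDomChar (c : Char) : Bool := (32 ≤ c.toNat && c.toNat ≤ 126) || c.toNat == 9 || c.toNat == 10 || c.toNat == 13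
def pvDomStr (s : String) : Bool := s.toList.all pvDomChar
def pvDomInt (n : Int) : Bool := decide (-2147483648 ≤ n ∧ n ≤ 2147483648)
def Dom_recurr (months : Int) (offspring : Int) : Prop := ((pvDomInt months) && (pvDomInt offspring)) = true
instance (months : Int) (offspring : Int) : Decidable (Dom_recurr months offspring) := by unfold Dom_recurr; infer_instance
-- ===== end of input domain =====

-- B replaces A's naive double recursion with a bottom-up loop keeping only the last two terms; asymptotically faster.

-- ===== PORT A =====
-- A's recursion is not structurally decreasing on Int, so it is run with fuel = months.toNat;
-- fuel is always sufficient on Pre_ (months ≥ 1), where months strictly decreases by ≥ 1 per call.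
def recurrGo (fuel : Nat) (months : Int) (offspring : Int) : Int :=
  match fuel with
  | 0 => 0  -- unreachable on Pre_ (fuel guard only)
  | fuel + 1 =>
    if months = 1 then 1
    else if months = 2 then offspring
    else
      let pgen1 := recurrGo fuel (months - 1) offspring
      let pgen2 := recurrGo fuel (months - 2) offspring
      if months ≤ 4 then pgen1 + pgen2
      else pgen1 + pgen2 * offspring

def recurr (months : Int) (offspring : Int) : Int :=
  recurrGo months.toNat months offspring

-- ===== PORT B =====
def recurr_alt (months : Int) (offspring : Int) : Int :=
  if months = 1 then 1
  else
    let p : Int × Int :=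
      (PySem.List.pyRange 3 (months + 1) 1).foldl
        (fun (pc : Int × Int) m => (pc.2, pc.2 + pc.1 * (if m ≤ 4 then 1 else offspring)))
        (1, offspring)
    p.2

-- ===== PRECONDITION & SPEC =====
-- Pre_ excludes months ≤ 0, where Python A recurses without a base case (RecursionError).
def Pre_recurr (months : Int) (offspring : Int) : Prop := 1 ≤ months
instance (months : Int) (offspring : Int) : Decidable (Pre_recurr months offspring) := by
  unfold Pre_recurr; infer_instance
def pvWitness_recurr : Int × Int := (6, 3)

def Spec_recurr (months : Int) (offspring : Int) (out : Int) : Prop := out = recurr_alt months offspring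
instance (months : Int) (offspring : Int) (out : Int) : Decidable (Spec_recurr months offspring out) := by
  unfold Spec_recurr; infer_instance

-- ===== CLAIM (what is proved, stated in full; the proofs are below) =====
def Claim_equal_recurr : Prop := ∀ (months : Int) (offspring : Int), Dom_recurr months offspring → Pre_recurr months offspring → Spec_recurr months offspring (recurr months offspring)

-- ===== LEMMAS AND PROOFS =====

-- Reference sequence: fib2 k n = number of pairs in month n+1.
def fib2 (k : Int) : Nat → Int
  | 0 => 1
  | 1 => k
  | n + 2 => fib2 k (n + 1) + fib2 k n * (if ((n : Int) + 3) ≤ 4 then 1 else k)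

theorem recurrGo_eq_fib2 (fuel : Nat) :
    ∀ (months k : Int), 1 ≤ months → months.toNat ≤ fuel →
      recurrGo fuel months k = fib2 k (months.toNat - 1) := by
  induction fuel with
  | zero => intro months k h1 h2; omega
  | succ fuel ih =>
    intro months k h1 h2
    rw [recurrGo]
    by_cases hm1 : months = 1
    · simp [hm1, fib2]
    · by_cases hm2 : months = 2
      · simp [hm2, fib2]
      · have h3 : 3 ≤ months := by omega
        have e1 : recurrGo fuel (months - 1) k = fib2 k ((months - 1).toNat - 1) :=
          ih (months - 1) k (by omega) (by omega)
        have e2 : recurrGo fuel (months - 2) k = fib2 k ((months - 2).toNat - 1) :=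
          ih (months - 2) k (by omega) (by omega)
        simp only [hm1, hm2, if_false, e1, e2]
        obtain ⟨n, hn⟩ : ∃ n : Nat, months = (n : Int) + 3 :=
          ⟨(months - 3).toNat, by omega⟩
        have ht : months.toNat - 1 = n + 2 := by omega
        have ht1 : (months - 1).toNat - 1 = n + 1 := by omega
        have ht2 : (months - 2).toNat - 1 = n := by omega
        rw [ht, ht1, ht2, fib2, ← hn]
        by_cases h4 : months ≤ 4 <;> simp [h4]

theorem foldl_pyRange_fib2 (k : Int) (n : Nat) (h : 2 ≤ n) :
    (PySem.List.pyRange 3 ((n : Int) + 1) 1).foldl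
      (fun (pc : Int × Int) m => (pc.2, pc.2 + pc.1 * (if m ≤ 4 then 1 else k)))
      (1, k) = (fib2 k (n - 2), fib2 k (n - 1)) := by
  induction n with
  | zero => omega
  | succ n ih =>
    by_cases hn : 2 ≤ n
    · have hsplit : PySem.List.pyRange 3 ((n : Int) + 1 + 1) 1
          = PySem.List.pyRange 3 ((n : Int) + 1) 1 ++ [(n : Int) + 1] := by
        have := PySem.List.pyRange_one_succ_right (a := 3) (b := (n : Int) + 1) (by omega)
        simpa using this
      have harg : ((n : Nat) + 1 : Nat) = ((n : Int) + 1 + 1 - 1).toNat := by omega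
      rw [show (((n : Nat) + 1 : Nat) : Int) = (n : Int) + 1 from by push_cast; ring,
        hsplit, List.foldl_append, ih hn]
      simp only [List.foldl_cons, List.foldl_nil]
      obtain ⟨m, hm⟩ : ∃ m : Nat, n = m + 2 := ⟨n - 2, by omega⟩
      subst hm
      have e1 : (m + 2 + 1 : Nat) - 2 = m + 1 := by omega
      have e2 : (m + 2 + 1 : Nat) - 1 = m + 2 := by omega
      have e3 : (m + 2 : Nat) - 2 = m := by omega
      have e4 : (m + 2 : Nat) - 1 = m + 1 := by omega
      rw [e1, e2, e3, e4, fib2]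
      have hc : (((m + 2 : Nat) : Int) + 1) = ((m : Nat) : Int) + 3 := by push_cast; ring
      rw [hc]
    · have hn2 : n = 1 := by omega
      subst hn2
      have : PySem.List.pyRange 3 ((1 : Int) + 1 + 1) 1 = [] :=
        PySem.List.pyRange_one_eq_nil (by omega)
      norm_num [this, fib2]

-- ===== VERDICT (by name: the statement is the Claim_ definition above) =====
theorem recurr_spec : Claim_equal_recurr := by
  intro months offspring _hdom hpre
  unfold Spec_recurr recurr recurr_alt
  have hpre' : (1 : Int) ≤ months := hpre
  by_cases hm1 : months = 1
  · subst hm1; norm_num [recurrGo]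
  · rw [if_neg hm1]
    have h2 : 2 ≤ months.toNat := by omega
    have hc : ((months.toNat : Int)) = months := by omega
    have := foldl_pyRange_fib2 offspring months.toNat h2
    rw [hc] at this
    rw [this]
    exact recurrGo_eq_fib2 months.toNat months offspring hpre' (le_refl _)
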